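-- pv_equiv track=rewrite | github.com/ivan1016017/LeetCodeAlgorithmProblems | src/my_project/hard_problems/from1to50/total_strength_wizards_class.py | get_presums
-- ===== SOURCE A (Python) =====
-- def get_presums(strength):
--     n  = len(strength)
--     res = [0] * (n + 2)
--     cur_sum = 0
--
--     for i in range(n):
--         cur_sum += strength[i]
--         res[i+1] = (res[i] + cur_sum)
--
--     return res
-- ===== SOURCE B (Python) =====
-- def get_presums(strength):
--     # Closed form per index: the double prefix sum at position k equals
--     # (k+1)*S_k - W_k, where S_k is the sum of the first k elements and
--     # W_k is their index-weighted sum (1-based weights).  Each output is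
--     # computed directly from this identity, never from the previous output.
--     out = [0]
--     S = W = 0
--     for idx, x in enumerate(strength):
--         k = idx + 1
--         S += x
--         W += k * x
--         out.append((k + 1) * S - W)
--     out.append(0)
--     return out
-- ===== Notes on version B (the rewrite author's own statement) =====
-- stated objective: alternative
-- what changed: Replaces A's recurrence res[i+1] = res[i] + cur_sum (each output derived from the previous output entry) with the closed-form identity out[k] = (k+1)*S_k - W_k computed from a running sum and a running index-weighted sum, so the output array is never read.
import Mathlib
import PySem

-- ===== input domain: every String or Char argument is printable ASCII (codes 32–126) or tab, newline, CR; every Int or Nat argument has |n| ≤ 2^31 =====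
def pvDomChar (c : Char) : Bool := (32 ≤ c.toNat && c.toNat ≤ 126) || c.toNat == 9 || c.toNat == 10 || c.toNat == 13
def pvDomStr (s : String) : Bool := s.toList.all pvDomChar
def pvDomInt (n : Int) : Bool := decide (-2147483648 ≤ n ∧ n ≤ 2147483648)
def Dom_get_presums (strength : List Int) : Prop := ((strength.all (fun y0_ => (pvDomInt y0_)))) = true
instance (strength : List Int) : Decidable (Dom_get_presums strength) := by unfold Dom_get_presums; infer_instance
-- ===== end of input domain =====

-- B replaces A's recurrence res[i+1] = res[i] + cur_sum with the per-index closed form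
-- out[k] = (k+1)*S_k - W_k (running sum and running index-weighted sum); objective: alternative.

-- ===== PORT A =====
-- literal port of A: res = [0]*(n+2); for i in range(n): cur += strength[i]; res[i+1] = res[i] + cur
-- (in-range reads strength[i] / res[i] never raise for 0 ≤ i < n, so pyGetD's default is never used)
def get_presums (strength : List Int) : List Int :=
  let n : Int := strength.length
  let res : List Int := List.replicate (n.toNat + 2) 0
  let st := (PySem.List.pyRange 0 n 1).foldl
    (fun (st : List Int × Int) i =>
      let cur := st.2 + PySem.List.pyGetD strength i 0
      (st.1.set (i + 1).toNat (PySem.List.pyGetD st.1 i 0 + cur), cur))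
    (res, 0)
  st.1

-- ===== PORT B =====
-- literal port of Source B: out = [0]; for idx, x in enumerate(strength): S += x; W += k*x;
-- out.append((k+1)*S - W); out.append(0)  — state is (S, W, out)
def get_presums_alt (strength : List Int) : List Int :=
  let st := strength.zipIdx.foldl
    (fun (st : Int × Int × List Int) (p : Int × Nat) =>
      let k : Int := (p.2 : Int) + 1
      let S := st.1 + p.1
      let W := st.2.1 + k * p.1
      (S, W, st.2.2 ++ [(k + 1) * S - W]))
    (0, 0, [0])
  st.2.2 ++ [0]

-- ===== PRECONDITION & SPEC =====
def Spec_get_presums (strength : List Int) (out : List Int) : Prop := out = get_presums_alt strength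
instance (strength : List Int) (out : List Int) : Decidable (Spec_get_presums strength out) := by unfold Spec_get_presums; infer_instance

-- ===== CLAIM (what is proved, stated in full; the proofs are below) =====
def Claim_equal_get_presums : Prop := ∀ (strength : List Int), Dom_get_presums strength → Spec_get_presums strength (get_presums strength)

-- ===== LEMMAS AND PROOFS =====

-- running-sum scan with carry (the common characterisation both ports are reduced to)
def pvAccum (acc : Int) : List Int → List Int
  | [] => []
  | x :: xs => (acc + x) :: pvAccum (acc + x) xs

theorem pvAccum_length (l : List Int) : ∀ acc, (pvAccum acc l).length = l.length := by
  induction l with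
  | nil => intro acc; rfl
  | cons x xs ih => intro acc; simp [pvAccum, ih]

theorem pvAccum_snoc (l : List Int) : ∀ acc x,
    pvAccum acc (l ++ [x]) = pvAccum acc l ++ [acc + l.sum + x] := by
  induction l with
  | nil => intro acc x; simp [pvAccum]
  | cons y ys ih =>
      intro acc x
      simp [pvAccum, ih, add_assoc]

theorem pvAccum_getD_last (l : List Int) : ∀ acc,
    (acc :: pvAccum acc l).getD l.length 0 = acc + l.sum := by
  induction l with
  | nil => intro acc; simp
  | cons x xs ih =>
      intro acc
      have h := ih (acc + x)
      simp only [pvAccum, List.length_cons, List.getD_cons_succ]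
      rw [h, List.sum_cons]; ring

-- A's loop invariant: after k iterations, res is 0 :: (double prefix of take k) padded with zeros,
-- and cur_sum is the sum of the first k elements
theorem get_presums_loop (strength : List Int) (k : Nat) (hk : k ≤ strength.length) :
    (PySem.List.pyRange 0 (k : Int) 1).foldl
      (fun (st : List Int × Int) i =>
        let cur := st.2 + PySem.List.pyGetD strength i 0
        (st.1.set (i + 1).toNat (PySem.List.pyGetD st.1 i 0 + cur), cur))
      (List.replicate (strength.length + 2) 0, 0)
    = ((0 :: pvAccum 0 (pvAccum 0 (strength.take k))) ++
         List.replicate (strength.length + 1 - k) 0,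
       (strength.take k).sum) := by
  induction k with
  | zero => simp [pvAccum, List.replicate_succ]
  | succ k ih =>
      have hk' : k ≤ strength.length := Nat.le_of_succ_le hk
      have hklt : k < strength.length := hk
      have hrange : PySem.List.pyRange 0 ((k + 1 : Nat) : Int) 1
          = PySem.List.pyRange 0 (k : Int) 1 ++ [(k : Int)] := by
        push_cast
        exact PySem.List.pyRange_one_succ_right (by positivity)
      rw [hrange, List.foldl_append, ih hk']
      simp only [List.foldl_cons, List.foldl_nil]
      have hs : PySem.List.pyGetD strength (k : Int) 0 = strength[k] := by
        rw [PySem.List.pyGetD_eq_getElem _ _ (by omega) (by exact_mod_cast hklt)]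
        simp
      have hlen1 : (pvAccum 0 (strength.take k)).length = k := by
        rw [pvAccum_length]; exact List.length_take_of_le hk'
      have hlen2 : (0 :: pvAccum 0 (pvAccum 0 (strength.take k))).length = k + 1 := by
        simp [pvAccum_length, hlen1]
      -- read: res[k] is the last written double-prefix value
      have hread :
          PySem.List.pyGetD ((0 :: pvAccum 0 (pvAccum 0 (strength.take k))) ++
            List.replicate (strength.length + 1 - k) 0) (k : Int) 0
          = (pvAccum 0 (strength.take k)).sum := by
        rw [PySem.List.pyGetD_natCast]
        have h3 := pvAccum_getD_last (pvAccum 0 (strength.take k)) 0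
        rw [hlen1] at h3
        have hleft : ((0 :: pvAccum 0 (pvAccum 0 (strength.take k))) ++
            List.replicate (strength.length + 1 - k) 0)[k]?
            = (0 :: pvAccum 0 (pvAccum 0 (strength.take k)))[k]? :=
          List.getElem?_append_left (by rw [hlen2]; omega)
        rw [List.getD_eq_getElem?_getD, hleft, ← List.getD_eq_getElem?_getD, h3, zero_add]
      rw [hread, hs]
      -- write: res.set (k+1) v appends v right after the double-prefix part
      have hpad : strength.length + 1 - k = (strength.length - k) + 1 := by omega
      have hset : ∀ v : Int,
          ((0 :: pvAccum 0 (pvAccum 0 (strength.take k))) ++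
            List.replicate (strength.length + 1 - k) 0).set ((k : Int) + 1).toNat v
          = (0 :: (pvAccum 0 (pvAccum 0 (strength.take k)) ++ [v])) ++
              List.replicate (strength.length - k) 0 := by
        intro v
        have htn : ((k : Int) + 1).toNat = k + 1 := by omega
        rw [htn, List.set_append_right _ _ (by omega), hlen2, hpad]
        simp [List.replicate_succ]
      rw [hset]
      -- identify the new value with the next double-prefix entry
      have htake : strength.take (k + 1) = strength.take k ++ [strength[k]] := by
        rw [List.take_add_one]
        simp [List.getElem?_eq_getElem hklt]
      have hsum : (List.take (k + 1) strength).sum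
          = (List.take k strength).sum + strength[k] := by
        rw [htake, List.sum_append, List.sum_cons, List.sum_nil]; ring
      have hinner : pvAccum 0 (strength.take (k + 1))
          = pvAccum 0 (strength.take k) ++ [(strength.take (k + 1)).sum] := by
        rw [hsum, htake, pvAccum_snoc, zero_add]
      have houter : pvAccum 0 (pvAccum 0 (strength.take (k + 1)))
          = pvAccum 0 (pvAccum 0 (strength.take k)) ++
              [(pvAccum 0 (strength.take k)).sum + (strength.take (k + 1)).sum] := by
        rw [hinner, pvAccum_snoc]
        simp
      rw [houter]
      have hrep : strength.length + 1 - (k + 1) = strength.length - k := by omega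
      rw [hsum, hrep]

-- B's loop invariant: given the identity C = (n+1)*S - W linking the carried state to the
-- next double-prefix value, the fold appends exactly the double-prefix scan of the suffix
theorem get_presums_alt_loop (xs : List Int) : ∀ (n : Nat) (S W C : Int) (out : List Int),
    C = ((n : Int) + 1) * S - W →
    ((xs.zipIdx n).foldl
      (fun (st : Int × Int × List Int) (p : Int × Nat) =>
        let k : Int := (p.2 : Int) + 1
        let S := st.1 + p.1
        let W := st.2.1 + k * p.1
        (S, W, st.2.2 ++ [(k + 1) * S - W]))
      (S, W, out)).2.2
    = out ++ pvAccum C (pvAccum S xs) := by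
  induction xs with
  | nil => intro n S W C out _; simp [pvAccum]
  | cons x xs ih =>
      intro n S W C out hC
      simp only [List.zipIdx_cons, List.foldl_cons]
      have hv : ((n : Int) + 1 + 1) * (S + x) - (W + ((n : Int) + 1) * x) = C + (S + x) := by
        rw [hC]; ring
      have hC' : C + (S + x) = (((n + 1 : Nat) : Int) + 1) * (S + x) - (W + ((n : Int) + 1) * x) := by
        push_cast; rw [hC]; ring
      have := ih (n + 1) (S + x) (W + ((n : Int) + 1) * x) (C + (S + x))
        (out ++ [((n : Int) + 1 + 1) * (S + x) - (W + ((n : Int) + 1) * x)]) hC'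
      simp only at this ⊢
      rw [this, hv]
      simp [pvAccum]

-- ===== VERDICT (by name: the statement is the Claim_ definition above) =====
theorem get_presums_spec : Claim_equal_get_presums := by
  intro strength _
  unfold Spec_get_presums get_presums get_presums_alt
  simp only
  have hA := get_presums_loop strength strength.length le_rfl
  simp only [List.take_length] at hA
  have hB := get_presums_alt_loop strength 0 0 0 0 [0] (by norm_num)
  rw [show (strength.length : Int).toNat = strength.length by simp, hA,
      show (strength.zipIdx : List (Int × Nat)) = strength.zipIdx 0 from rfl, hB]
  simp [List.replicate_succ]
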